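-- pv_equiv track=rewrite | github.com/bvreede/periodicname | periodicname/periodicname.py | _make_word_list
-- ===== SOURCE A (Python) =====
-- def _make_word_list(sequence,word):
--     """Make a list of possible elements from a word.
--
--     Based on the word and a possible way to split this word up
--     in elements of 1 or 2 letters, generate a list of hypothetical elements.
--     """
--     # Ensure that the sequence and the word match
--     if sequence.count("S") + sequence.count("D") * 2 != len(word):
--         raise ValueError("Length of sequence (in 'S' and 'D') and word do not match")
--     wordlist = []
--     index = 0
--     for i in sequence:
--         if i == 'D':
--             wordlist.append(word[index:index+2])
--             index += 2
--         elif i == 'S':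
--             wordlist.append(word[index])
--             index += 1
--     return wordlist
-- ===== SOURCE B (Python) =====
-- def _make_word_list(sequence, word):
--     """Make a list of possible elements from a word.
--
--     Two-pass decomposition: build a table of element lengths from the
--     sequence, validate, compute the start offsets by a running prefix sum,
--     then cut the word into slices.
--     """
--     lengths = [2 if c == 'D' else 1 for c in sequence if c in ('S', 'D')]
--     if sum(lengths) != len(word):
--         raise ValueError("Length of sequence (in 'S' and 'D') and word do not match")
--     starts = []
--     s = 0
--     for L in lengths:
--         starts.append(s)
--         s += L
--     return [word[st:st + L] for st, L in zip(starts, lengths)]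
-- ===== Notes on version B (the rewrite author's own statement) =====
-- stated objective: alternative
-- what changed: Replaces A's single index-tracking append loop by a lengths-table/prefix-sum/slice decomposition: compute element lengths from the sequence, their cumulative start offsets, then cut the word with slices in a separate pass.
import Mathlib
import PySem

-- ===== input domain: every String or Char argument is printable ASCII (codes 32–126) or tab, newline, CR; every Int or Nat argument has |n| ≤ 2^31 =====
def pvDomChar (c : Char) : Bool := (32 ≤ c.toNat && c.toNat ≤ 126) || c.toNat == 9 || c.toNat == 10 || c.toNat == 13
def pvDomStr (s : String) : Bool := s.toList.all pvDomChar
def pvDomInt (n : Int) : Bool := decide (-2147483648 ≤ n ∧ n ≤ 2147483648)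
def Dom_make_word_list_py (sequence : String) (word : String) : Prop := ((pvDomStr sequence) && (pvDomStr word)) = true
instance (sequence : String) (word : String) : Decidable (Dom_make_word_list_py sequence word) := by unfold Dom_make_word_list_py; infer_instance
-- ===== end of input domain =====

-- B replaces A's single index-tracking append loop by a lengths-table / prefix-sum / slice
-- decomposition (alternative structure, same cost); A = B on all inputs where A returns
-- (Pre_ excludes the length-mismatch inputs on which A raises ValueError).


-- ===== PORT A =====
-- Literal port of A's loop body: state (wordlist, index); word[index] via pyGet? (the none
-- case, IndexError, is unreachable under Pre_ — "" is a totality default only).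
def pvStepA (w : List Char) (st : List String × Int) (i : Char) : List String × Int :=
  if i = 'D' then
    (st.1 ++ [String.ofList (PySem.List.slice w (some st.2) (some (st.2 + 2)))], st.2 + 2)
  else if i = 'S' then
    (st.1 ++ [match PySem.List.pyGet? w st.2 with
              | some c => String.ofList [c]
              | none => ""], st.2 + 1)
  else st

def make_word_list_py (sequence : String) (word : String) : List String :=
  (sequence.toList.foldl (pvStepA word.toList) ([], 0)).1

-- ===== PORT B =====
-- Port of B: lengths table, prefix-sum starts loop, then slices over zip(starts, lengths).
def pvLengths (cs : List Char) : List Int :=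
  (cs.filter (fun c => c = 'S' || c = 'D')).map (fun c => if c = 'D' then 2 else 1)

def pvStarts (lengths : List Int) : List Int :=
  (lengths.foldl (fun (p : List Int × Int) L => (p.1 ++ [p.2], p.2 + L)) ([], 0)).1

def make_word_list_py_alt (sequence : String) (word : String) : List String :=
  ((pvStarts (pvLengths sequence.toList)).zip (pvLengths sequence.toList)).map
    (fun sl => String.ofList (PySem.List.slice word.toList (some sl.1) (some (sl.1 + sl.2))))

-- ===== PRECONDITION & SPEC =====
-- Pre_ excludes exactly the inputs on which A raises ValueError (length mismatch);
-- B raises the identical ValueError there.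
def Pre_make_word_list_py (sequence : String) (word : String) : Prop :=
  (sequence.toList.count 'S' : Int) + (sequence.toList.count 'D' : Int) * 2 = word.toList.length

instance (sequence : String) (word : String) : Decidable (Pre_make_word_list_py sequence word) := by
  unfold Pre_make_word_list_py; infer_instance

def pvWitness_make_word_list_py : String × String := ("SDS", "abcd")

def Spec_make_word_list_py (sequence : String) (word : String) (out : List String) : Prop := out = make_word_list_py_alt sequence word
instance (sequence : String) (word : String) (out : List String) : Decidable (Spec_make_word_list_py sequence word out) := by unfold Spec_make_word_list_py; infer_instance

-- ===== CLAIM (what is proved, stated in full; the proofs are below) =====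
def Claim_equal_make_word_list_py : Prop := ∀ (sequence : String) (word : String), Dom_make_word_list_py sequence word → Pre_make_word_list_py sequence word → Spec_make_word_list_py sequence word (make_word_list_py sequence word)

-- ===== LEMMAS AND PROOFS =====

-- Reference chunk list both ports are shown equal to.
def pvChunks (w : List Char) : List Char → Int → List String
  | [], _ => []
  | c :: cs, idx =>
    if c = 'D' then
      String.ofList (PySem.List.slice w (some idx) (some (idx + 2))) :: pvChunks w cs (idx + 2)
    else if c = 'S' then
      String.ofList (PySem.List.slice w (some idx) (some (idx + 1))) :: pvChunks w cs (idx + 1)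
    else pvChunks w cs idx

-- w[idx] (as a 1-char string, "" past the end) equals the slice w[idx:idx+1], for 0 ≤ idx.
lemma pv_get_eq_slice (w : List Char) (idx : Int) (h : 0 ≤ idx) :
    (match PySem.List.pyGet? w idx with
     | some c => String.ofList [c]
     | none => "") = String.ofList (PySem.List.slice w (some idx) (some (idx + 1))) := by
  obtain ⟨n, rfl⟩ := Int.eq_ofNat_of_zero_le h
  have h1 : ((n : Int) + 1) = ((n + 1 : Nat) : Int) := by push_cast; ring
  rw [PySem.List.pyGet?_natCast, h1, PySem.List.slice_natCast]
  by_cases hn : n < w.length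
  · rw [List.getElem?_eq_getElem hn]
    simp [show n + 1 - n = 1 from by omega, List.take_one_drop_eq_of_lt_length hn]
  · rw [List.getElem?_eq_none (by omega), List.drop_eq_nil_of_le (by omega), List.take_nil]

lemma pvStepA_D (w : List Char) (st : List String × Int) :
    pvStepA w st 'D' = (st.1 ++ [String.ofList (PySem.List.slice w (some st.2) (some (st.2 + 2)))], st.2 + 2) := by
  simp [pvStepA]

lemma pvStepA_S (w : List Char) (st : List String × Int) (h : 0 ≤ st.2) :
    pvStepA w st 'S' = (st.1 ++ [String.ofList (PySem.List.slice w (some st.2) (some (st.2 + 1)))], st.2 + 1) := by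
  simp only [pvStepA]
  rw [pv_get_eq_slice w st.2 h]
  simp

lemma pvStepA_other (w : List Char) (st : List String × Int) (c : Char) (hD : c ≠ 'D') (hS : c ≠ 'S') :
    pvStepA w st c = st := by
  simp [pvStepA, hD, hS]

-- A's fold equals acc ++ pvChunks.
lemma pv_foldA (w : List Char) : ∀ (cs : List Char) (acc : List String) (idx : Int), 0 ≤ idx →
    (cs.foldl (pvStepA w) (acc, idx)).1 = acc ++ pvChunks w cs idx := by
  intro cs
  induction cs with
  | nil => intro acc idx _; simp [pvChunks]
  | cons c cs ih =>
    intro acc idx hidx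
    rw [List.foldl_cons]
    by_cases hD : c = 'D'
    · subst hD
      rw [pvStepA_D, ih _ _ (by omega)]
      simp [pvChunks]
    · by_cases hS : c = 'S'
      · subst hS
        rw [pvStepA_S w (acc, idx) hidx, ih _ _ (by omega)]
        simp [pvChunks, hD]
      · rw [pvStepA_other w _ c hD hS, ih _ _ hidx]
        simp [pvChunks, hD, hS]

-- Prefix-sum scan of the lengths.
def pvScan : List Int → Int → List Int
  | [], _ => []
  | L :: ls, s => s :: pvScan ls (s + L)

-- B's starts fold is acc ++ the prefix-sum scan of the lengths.
lemma pv_starts (ls : List Int) : ∀ (acc : List Int) (s : Int),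
    (ls.foldl (fun (p : List Int × Int) L => (p.1 ++ [p.2], p.2 + L)) (acc, s)).1
      = acc ++ pvScan ls s := by
  induction ls with
  | nil => intro acc s; simp [pvScan]
  | cons L ls ih =>
    intro acc s
    rw [List.foldl_cons]
    simp only []
    rw [ih]
    simp [pvScan]

-- B's map over zip(pvScan lengths, lengths) equals pvChunks.
lemma pvLengths_D (cs : List Char) : pvLengths ('D' :: cs) = 2 :: pvLengths cs := by
  simp [pvLengths]

lemma pvLengths_S (cs : List Char) : pvLengths ('S' :: cs) = 1 :: pvLengths cs := by
  simp [pvLengths]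

lemma pvLengths_other (c : Char) (cs : List Char) (hD : c ≠ 'D') (hS : c ≠ 'S') :
    pvLengths (c :: cs) = pvLengths cs := by
  simp [pvLengths, hD, hS]

lemma pv_zip_eq_chunks (w : List Char) : ∀ (cs : List Char) (s : Int),
    ((pvScan (pvLengths cs) s).zip (pvLengths cs)).map
        (fun sl => String.ofList (PySem.List.slice w (some sl.1) (some (sl.1 + sl.2))))
      = pvChunks w cs s := by
  intro cs
  induction cs with
  | nil => intro s; simp [pvLengths, pvScan, pvChunks]
  | cons c cs ih =>
    intro s
    by_cases hD : c = 'D'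
    · subst hD
      rw [pvLengths_D]
      simp only [pvScan, List.zip_cons_cons, List.map_cons]
      rw [ih (s + 2)]
      simp [pvChunks]
    · by_cases hS : c = 'S'
      · subst hS
        rw [pvLengths_S]
        simp only [pvScan, List.zip_cons_cons, List.map_cons]
        rw [ih (s + 1)]
        simp [pvChunks, hD]
      · rw [pvLengths_other c cs hD hS, ih s]
        simp [pvChunks, hD, hS]

-- ===== VERDICT (by name: the statement is the Claim_ definition above) =====
theorem make_word_list_py_spec : Claim_equal_make_word_list_py := by
  intro sequence word _ _
  unfold Spec_make_word_list_py make_word_list_py make_word_list_py_alt pvStarts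
  rw [pv_foldA word.toList sequence.toList [] 0 le_rfl, List.nil_append,
    pv_starts, List.nil_append, pv_zip_eq_chunks word.toList sequence.toList 0]
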